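-- pv_equiv track=rewrite | github.com/MrBrantCode/unitest_baseline | mut_generate/mist_train_taco/taco_6595/solution.py | find_monocarp_k_values
-- ===== SOURCE A (Python) =====
-- def find_monocarp_k_values(t, test_cases):
--     results = []
--
--     for case in test_cases:
--         n, a, b = case
--         kranges = [0] * (n + 1)
--
--         for i in range(n):
--             diff = a[i] - b[i]
--             if diff >= 1:
--                 kranges[b[i]] += 1
--                 kranges[a[i]] -= 1
--
--         for i in range(1, n + 1):
--             kranges[i] += kranges[i - 1]
--
--         newk = []
--         for i in range(1, n + 1):
--             accept = True
--             for j in range(i, n + 1, i):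
--                 if kranges[j] != 0:
--                     accept = False
--                     break
--             if accept:
--                 newk.append(i)
--
--         results.append((len(newk), newk))
--
--     return results
-- ===== SOURCE B (Python) =====
-- def find_monocarp_k_values(t, test_cases):
--     results = []
--     for n, a, b in test_cases:
--         # phase 1: collect the +1/-1 boundary events of every decreasing pair
--         events = []
--         for i in range(n):
--             if a[i] - b[i] >= 1:
--                 events.append((b[i], 1))
--                 events.append((a[i], -1))
--         cover = [0] * (n + 1)
--         for p, d in events:
--             cover[p] += d
--         # phase 2: inverted sieve -- walk the running coverage once and, at each
--         # covered position j, mark every divisor of j as an invalid k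
--         invalid = [False] * (n + 1)
--         run = 0
--         for j in range(n + 1):
--             run += cover[j]
--             if j > 0 and run != 0:
--                 for d in range(1, j + 1):
--                     if j % d == 0:
--                         invalid[d] = True
--         newk = [i for i in range(1, n + 1) if not invalid[i]]
--         results.append((len(newk), newk))
--     return results
-- ===== Notes on version B (the rewrite author's own statement) =====
-- stated objective: alternative
-- what changed: B inverts A's sieve: instead of scanning all multiples of every candidate k (with break), B walks the running coverage once and, at each nonzero-coverage position j, marks every divisor of j in an invalid[] array, then keeps the unmarked k; the difference array is also built as an explicit event list folded into the cover array.
import Mathlib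
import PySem

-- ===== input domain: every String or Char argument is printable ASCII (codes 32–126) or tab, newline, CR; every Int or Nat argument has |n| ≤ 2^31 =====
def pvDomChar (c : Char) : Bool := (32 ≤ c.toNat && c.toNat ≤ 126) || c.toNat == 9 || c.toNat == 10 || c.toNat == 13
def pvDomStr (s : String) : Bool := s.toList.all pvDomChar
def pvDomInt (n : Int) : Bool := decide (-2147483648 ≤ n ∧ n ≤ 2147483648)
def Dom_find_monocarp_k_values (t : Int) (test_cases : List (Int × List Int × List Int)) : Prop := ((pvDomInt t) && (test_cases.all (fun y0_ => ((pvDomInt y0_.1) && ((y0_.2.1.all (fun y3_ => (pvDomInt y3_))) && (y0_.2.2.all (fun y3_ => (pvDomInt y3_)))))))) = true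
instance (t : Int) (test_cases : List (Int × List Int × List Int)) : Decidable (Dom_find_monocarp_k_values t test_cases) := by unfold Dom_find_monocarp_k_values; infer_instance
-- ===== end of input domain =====

-- B inverts A's sieve: one pass over the running coverage marks every divisor of each covered
-- position in an invalid[] array (the difference array is built through an explicit event list);
-- objective: alternative decomposition, same results.

-- ===== PORT A =====
-- body of A's first loop: 'diff = a[i]-b[i]; if diff >= 1: kranges[b[i]] += 1; kranges[a[i]] -= 1'
def pvA_diff (a b : List Int) (kr : List Int) (i : Int) : List Int :=
  if PySem.List.pyGetD a i 0 - PySem.List.pyGetD b i 0 ≥ 1 then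
    PySem.List.pySetD
      (PySem.List.pySetD kr (PySem.List.pyGetD b i 0)
        (PySem.List.pyGetD kr (PySem.List.pyGetD b i 0) 0 + 1))
      (PySem.List.pyGetD a i 0)
      (PySem.List.pyGetD
        (PySem.List.pySetD kr (PySem.List.pyGetD b i 0)
          (PySem.List.pyGetD kr (PySem.List.pyGetD b i 0) 0 + 1))
        (PySem.List.pyGetD a i 0) 0 - 1)
  else kr

-- body of A's prefix-sum loop: 'kranges[i] += kranges[i-1]'
def pvA_pstep (kr : List Int) (i : Int) : List Int :=
  PySem.List.pySetD kr i (PySem.List.pyGetD kr i 0 + PySem.List.pyGetD kr (i - 1) 0)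

-- A's inner loop 'for j in range(i, n+1, i): if kranges[j] != 0: accept = False; break'
def pvA_check (kr : List Int) : List Int → Bool
  | [] => true
  | j :: rest => if PySem.List.pyGetD kr j 0 ≠ 0 then false else pvA_check kr rest

-- A's candidate loop over i in range(1, n+1), appending accepted i to newk
def pvA_sieve (n : Int) (kr2 : List Int) : List Int :=
  (PySem.List.pyRange 1 (n + 1) 1).foldl
    (fun acc i => if pvA_check kr2 (PySem.List.pyRange i (n + 1) i) then acc ++ [i] else acc) []

-- 'results.append((len(newk), newk))'
def pvA_pair (newk : List Int) : Int × List Int := ((newk.length : Int), newk)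

def pvA_case (c : Int × List Int × List Int) : Int × List Int :=
  pvA_pair (pvA_sieve c.1
    ((PySem.List.pyRange 1 (c.1 + 1) 1).foldl pvA_pstep
      ((PySem.List.pyRange 0 c.1 1).foldl (pvA_diff c.2.1 c.2.2)
        (List.replicate (c.1 + 1).toNat 0))))

def find_monocarp_k_values (t : Int) (test_cases : List (Int × List Int × List Int)) : List (Int × List Int) :=
  test_cases.foldl (fun results c => results ++ [pvA_case c]) []

-- ===== PORT B =====
-- B's event builder: 'if a[i]-b[i] >= 1: events.append((b[i],1)); events.append((a[i],-1))'
def pvB_events (a b : List Int) (ev : List (Int × Int)) (i : Int) : List (Int × Int) :=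
  if PySem.List.pyGetD a i 0 - PySem.List.pyGetD b i 0 ≥ 1 then
    ev ++ [(PySem.List.pyGetD b i 0, 1), (PySem.List.pyGetD a i 0, -1)]
  else ev

-- 'for p, d in events: cover[p] += d'
def pvB_bump (cv : List Int) (pd : Int × Int) : List Int :=
  PySem.List.pySetD cv pd.1 (PySem.List.pyGetD cv pd.1 0 + pd.2)

-- inner divisor loop: 'for d in range(1, j+1): if j % d == 0: invalid[d] = True'
def pvB_mark (j : Int) (inv : List Bool) : List Bool :=
  (PySem.List.pyRange 1 (j + 1) 1).foldl
    (fun inv d => if PySem.Int.mod j d = 0 then PySem.List.pySetD inv d true else inv) inv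

-- body of 'for j in range(n+1)': state = (run, invalid); test on the UPDATED run
def pvB_jstep (cover : List Int) (st : Int × List Bool) (j : Int) : Int × List Bool :=
  (st.1 + PySem.List.pyGetD cover j 0,
   if 0 < j ∧ st.1 + PySem.List.pyGetD cover j 0 ≠ 0 then pvB_mark j st.2 else st.2)

def pvB_case (c : Int × List Int × List Int) : Int × List Int :=
  let n := c.1
  let cover := ((PySem.List.pyRange 0 n 1).foldl (pvB_events c.2.1 c.2.2) []).foldl pvB_bump
      (List.replicate (n + 1).toNat 0)
  let invalid := ((PySem.List.pyRange 0 (n + 1) 1).foldl (pvB_jstep cover)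
      ((0 : Int), List.replicate (n + 1).toNat false)).2
  let newk := (PySem.List.pyRange 1 (n + 1) 1).filter
      (fun i => ! PySem.List.pyGetD invalid i false)
  ((newk.length : Int), newk)

def find_monocarp_k_values_alt (t : Int) (test_cases : List (Int × List Int × List Int)) : List (Int × List Int) :=
  test_cases.foldl (fun results c => results ++ [pvB_case c]) []

-- ===== PRECONDITION & SPEC =====
-- Pre_ excludes exactly the inputs on which A raises IndexError: a case whose n exceeds the length
-- of a or b, or an update position a[i]/b[i] (with a[i]-b[i] >= 1) outside Python's valid index
-- range for the length-(n+1) array.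
def Pre_find_monocarp_k_values (t : Int) (test_cases : List (Int × List Int × List Int)) : Prop :=
  ∀ c ∈ test_cases,
    c.1 ≤ (c.2.1.length : Int) ∧ c.1 ≤ (c.2.2.length : Int) ∧
    ∀ i < c.1.toNat,
      c.2.1.getD i 0 - c.2.2.getD i 0 ≥ 1 →
        PySem.Raise.InRange (c.1 + 1).toNat (c.2.2.getD i 0) ∧
        PySem.Raise.InRange (c.1 + 1).toNat (c.2.1.getD i 0)
instance (t : Int) (test_cases : List (Int × List Int × List Int)) : Decidable (Pre_find_monocarp_k_values t test_cases) := by unfold Pre_find_monocarp_k_values; infer_instance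

def pvWitness_find_monocarp_k_values : Int × (List (Int × List Int × List Int)) :=
  (1, [(3, [2, 3, 1], [1, 1, 1])])

def Spec_find_monocarp_k_values (t : Int) (test_cases : List (Int × List Int × List Int)) (out : List (Int × List Int)) : Prop := out = find_monocarp_k_values_alt t test_cases
instance (t : Int) (test_cases : List (Int × List Int × List Int)) (out : List (Int × List Int)) : Decidable (Spec_find_monocarp_k_values t test_cases out) := by unfold Spec_find_monocarp_k_values; infer_instance

-- ===== CLAIM (what is proved, stated in full; the proofs are below) =====
def Claim_equal_find_monocarp_k_values : Prop := ∀ (t : Int) (test_cases : List (Int × List Int × List Int)), Dom_find_monocarp_k_values t test_cases → Pre_find_monocarp_k_values t test_cases → Spec_find_monocarp_k_values t test_cases (find_monocarp_k_values t test_cases)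

-- ===== LEMMAS AND PROOFS =====

-- prefix sums of an array: pvS kr j = kr[0] + … + kr[j]
def pvS (kr : List Int) (j : Int) : Int :=
  ((PySem.List.pyRange 0 (j + 1) 1).map fun m => PySem.List.pyGetD kr m 0).sum

lemma pvS_neg_one (kr : List Int) : pvS kr (-1) = 0 := by
  simp [pvS]

lemma pvS_step (kr : List Int) (j : Int) (h : 0 ≤ j) :
    pvS kr j = pvS kr (j - 1) + PySem.List.pyGetD kr j 0 := by
  have h1 : j - 1 + 1 = j := by ring
  unfold pvS
  rw [show j + 1 = (j - 1 + 1) + 1 by ring,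
    PySem.List.pyRange_one_succ_right (by omega : (0:Int) ≤ j - 1 + 1)]
  simp [h1]

lemma pv_check_eq (kr : List Int) (l : List Int) :
    pvA_check kr l = l.all fun j => PySem.List.pyGetD kr j 0 == 0 := by
  induction l with
  | nil => rfl
  | cons j rest ih =>
      by_cases h : PySem.List.pyGetD kr j 0 = 0 <;> simp [pvA_check, h, ih]

-- B's event list folded by pvB_bump performs exactly A's per-i double update
lemma pv_cover_eq (a b : List Int) (l : List Int) :
    ∀ (ev : List (Int × Int)) (kr : List Int),
    (l.foldl (pvB_events a b) ev).foldl pvB_bump kr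
      = l.foldl (pvA_diff a b) (ev.foldl pvB_bump kr) := by
  induction l with
  | nil => intro ev kr; rfl
  | cons i rest ih =>
      intro ev kr
      rw [List.foldl_cons, List.foldl_cons, ih]
      congr 1
      unfold pvB_events pvA_diff
      by_cases h : PySem.List.pyGetD a i 0 - PySem.List.pyGetD b i 0 ≥ 1
      · rw [if_pos h, if_pos h, List.foldl_append]
        simp [pvB_bump, Int.sub_eq_add_neg]
      · rw [if_neg h, if_neg h]

lemma pv_diff_len (a b : List Int) (l : List Int) (kr : List Int) :
    (l.foldl (pvA_diff a b) kr).length = kr.length := by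
  induction l generalizing kr with
  | nil => rfl
  | cons i rest ih =>
      rw [List.foldl_cons, ih]
      unfold pvA_diff
      split <;> simp [PySem.List.length_pySetD]

lemma pv_prefix_len (l : List Int) (kr : List Int) :
    (l.foldl pvA_pstep kr).length = kr.length := by
  induction l generalizing kr with
  | nil => rfl
  | cons i rest ih =>
      rw [List.foldl_cons, ih]
      simp [pvA_pstep, PySem.List.length_pySetD]

lemma pv_prefix_get (kr : List Int) (k : Nat) (hk : k < kr.length) (j : Int)
    (hj0 : 0 ≤ j) (hj : j < (kr.length : Int)) :
    PySem.List.pyGetD ((PySem.List.pyRange 1 (1 + (k : Int)) 1).foldl pvA_pstep kr) j 0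
      = if j ≤ (k : Int) then pvS kr j else PySem.List.pyGetD kr j 0 := by
  induction k generalizing j with
  | zero =>
      rw [show (1 + ((0 : Nat) : Int)) = 1 by norm_num, PySem.List.pyRange_one_eq_nil le_rfl,
        List.foldl_nil]
      by_cases h : j ≤ ((0 : Nat) : Int)
      · have hj' : j = 0 := by omega
        subst hj'
        rw [if_pos h]
        unfold pvS
        rw [show (0 : Int) + 1 = 0 + 1 from rfl, PySem.List.pyRange_one_singleton]
        simp
      · rw [if_neg h]
  | succ k ih =>
      have hk' : k < kr.length := Nat.lt_of_succ_lt hk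
      have hrange : PySem.List.pyRange 1 (1 + ((k + 1 : Nat) : Int)) 1
          = PySem.List.pyRange 1 (1 + (k : Int)) 1 ++ [1 + (k : Int)] := by
        rw [show (1 + ((k + 1 : Nat) : Int)) = (1 + (k : Int)) + 1 by push_cast; ring]
        exact PySem.List.pyRange_one_succ_right (by omega)
      rw [hrange, List.foldl_append, List.foldl_cons, List.foldl_nil]
      set r := (PySem.List.pyRange 1 (1 + (k : Int)) 1).foldl pvA_pstep kr with hr
      have hrlen : r.length = kr.length := pv_prefix_len _ _
      have ihk := fun j h0 h1 => ih hk' j h0 h1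
      have hgethi : PySem.List.pyGetD r (1 + (k : Int)) 0
          = PySem.List.pyGetD kr (1 + (k : Int)) 0 := by
        rw [ihk (1 + (k : Int)) (by omega) (by omega), if_neg (by omega)]
      have hgetlo : PySem.List.pyGetD r ((1 + (k : Int)) - 1) 0 = pvS kr (k : Int) := by
        rw [show (1 + (k : Int)) - 1 = (k : Int) by ring,
          ihk (k : Int) (by omega) (by omega), if_pos le_rfl]
      unfold pvA_pstep
      rw [hgethi, hgetlo, show (1 + (k : Int)) = ((k + 1 : Nat) : Int) by push_cast; ring]
      have hjt : ((j.toNat : Nat) : Int) = j := Int.toNat_of_nonneg hj0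
      rw [← hjt, PySem.List.pyGetD_pySetD_natCast r (k + 1) j.toNat _ _ (by omega)]
      by_cases hj1 : j.toNat = k + 1
      · rw [if_pos hj1, if_pos (by omega), hj1,
          pvS_step kr ((k + 1 : Nat) : Int) (by omega),
          show ((k + 1 : Nat) : Int) - 1 = (k : Int) by push_cast; ring]
        ring
      · rw [if_neg hj1, ihk _ (by omega) (by omega)]
        by_cases h2 : ((j.toNat : Nat) : Int) ≤ (k : Int)
        · rw [if_pos h2, if_pos (by omega)]
        · rw [if_neg h2, if_neg (by omega)]

-- the divisor-marking fold preserves the array length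
lemma pv_markbody_len (j : Int) (l : List Int) (inv : List Bool) :
    (l.foldl (fun inv d => if PySem.Int.mod j d = 0 then PySem.List.pySetD inv d true else inv)
      inv).length = inv.length := by
  induction l generalizing inv with
  | nil => rfl
  | cons d rest ih =>
      rw [List.foldl_cons, ih]
      split <;> simp [PySem.List.length_pySetD]

lemma pvB_mark_len (j : Int) (inv : List Bool) : (pvB_mark j inv).length = inv.length :=
  pv_markbody_len j _ inv

-- what one divisor pass sets: cell i becomes true iff it was, or i is a divisor of j in 1..u
lemma pv_mark_get_aux (j : Int) (u : Nat) :
    ∀ (inv : List Bool) (i : Int), 0 ≤ i → u < inv.length →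
    PySem.List.pyGetD
      ((PySem.List.pyRange 1 ((u : Int) + 1) 1).foldl
        (fun inv d => if PySem.Int.mod j d = 0 then PySem.List.pySetD inv d true else inv) inv)
      i false
    = (PySem.List.pyGetD inv i false
        || decide (1 ≤ i ∧ i ≤ (u : Int) ∧ PySem.Int.mod j i = 0)) := by
  induction u with
  | zero =>
      intro inv i _ _
      rw [show ((0 : Nat) : Int) + 1 = 1 by norm_num, PySem.List.pyRange_one_eq_nil le_rfl,
        List.foldl_nil, decide_eq_false (by omega : ¬(1 ≤ i ∧ i ≤ ((0:Nat):Int) ∧ _)),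
        Bool.or_false]
  | succ u ih =>
      intro inv i hi0 hu
      have hu' : u < inv.length := Nat.lt_of_succ_lt hu
      have hit : ((i.toNat : Nat) : Int) = i := Int.toNat_of_nonneg hi0
      rw [show ((u + 1 : Nat) : Int) + 1 = ((u : Int) + 1) + 1 by push_cast; ring,
        PySem.List.pyRange_one_succ_right (by omega), List.foldl_append,
        List.foldl_cons, List.foldl_nil]
      set r := (PySem.List.pyRange 1 ((u : Int) + 1) 1).foldl
        (fun inv d => if PySem.Int.mod j d = 0 then PySem.List.pySetD inv d true else inv) inv
        with hr
      have hrlen : r.length = inv.length := pv_markbody_len j _ inv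
      by_cases hm : PySem.Int.mod j ((u : Int) + 1) = 0
      · rw [if_pos hm,
          show (u : Int) + 1 = ((u + 1 : Nat) : Int) by push_cast; ring, ← hit,
          PySem.List.pyGetD_pySetD_natCast r (u + 1) i.toNat _ _ (by omega)]
        by_cases hie : i.toNat = u + 1
        · rw [if_pos hie, decide_eq_true (by
            refine ⟨by omega, by omega, ?_⟩
            have : i = (u : Int) + 1 := by omega
            rw [this]; exact hm)]
          simp
        · rw [if_neg hie, hit, ih inv i hi0 hu']
          congr 1
          by_cases h1 : 1 ≤ i ∧ i ≤ (u : Int) ∧ PySem.Int.mod j i = 0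
          · rw [decide_eq_true h1, decide_eq_true ⟨h1.1, by omega, h1.2.2⟩]
          · rw [decide_eq_false h1, decide_eq_false (by
              intro ⟨a1, a2, a3⟩
              exact h1 ⟨a1, by omega, a3⟩)]
      · rw [if_neg hm, ih inv i hi0 hu']
        congr 1
        by_cases h1 : 1 ≤ i ∧ i ≤ (u : Int) ∧ PySem.Int.mod j i = 0
        · rw [decide_eq_true h1, decide_eq_true ⟨h1.1, by omega, h1.2.2⟩]
        · rw [decide_eq_false h1, decide_eq_false (by
            intro ⟨a1, a2, a3⟩
            refine h1 ⟨a1, ?_, a3⟩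
            by_contra hgt
            have hie : i = (u : Int) + 1 := by omega
            exact hm (hie ▸ a3))]

lemma pvB_mark_get (j i : Int) (inv : List Bool) (hi0 : 0 ≤ i) (hj1 : 1 ≤ j)
    (hj2 : j < (inv.length : Int)) :
    PySem.List.pyGetD (pvB_mark j inv) i false
      = (PySem.List.pyGetD inv i false
          || decide (1 ≤ i ∧ i ≤ j ∧ PySem.Int.mod j i = 0)) := by
  have hcast : ((j.toNat : Nat) : Int) = j := Int.toNat_of_nonneg (by omega)
  unfold pvB_mark
  rw [show j + 1 = ((j.toNat : Nat) : Int) + 1 by rw [hcast]]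
  rw [pv_mark_get_aux j j.toNat inv i hi0 (by omega), hcast]

-- iterated marking over a list of bad positions
lemma pv_marks_get (bs : List Int) :
    ∀ (inv : List Bool) (i : Int), 0 ≤ i → (∀ j ∈ bs, 1 ≤ j ∧ j < (inv.length : Int)) →
    PySem.List.pyGetD (bs.foldl (fun inv j => pvB_mark j inv) inv) i false
      = (PySem.List.pyGetD inv i false
          || bs.any fun j => decide (1 ≤ i ∧ i ≤ j ∧ PySem.Int.mod j i = 0)) := by
  induction bs with
  | nil => intro inv i _ _; simp
  | cons j rest ih =>
      intro inv i hi0 hbs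
      rw [List.foldl_cons,
        ih (pvB_mark j inv) i hi0 (by
          intro j' hj'
          rw [pvB_mark_len]
          exact hbs j' (List.mem_cons_of_mem _ hj')),
        pvB_mark_get j i inv hi0 (hbs j (List.mem_cons_self)).1 (hbs j (List.mem_cons_self)).2]
      simp [Bool.or_assoc]

-- B's running pass: after j = 0..k-1 the state is (prefix sum, marks of the bad positions so far)
lemma pv_jfold (cover : List Int) (inv0 : List Bool) (k : Nat) :
    (PySem.List.pyRange 0 (k : Int) 1).foldl (pvB_jstep cover) ((0 : Int), inv0)
      = (pvS cover ((k : Int) - 1),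
         ((PySem.List.pyRange 1 (k : Int) 1).filter fun j => decide (pvS cover j ≠ 0)).foldl
            (fun inv j => pvB_mark j inv) inv0) := by
  induction k with
  | zero =>
      rw [show ((0 : Nat) : Int) = 0 from rfl, PySem.List.pyRange_one_eq_nil le_rfl,
        PySem.List.pyRange_one_eq_nil (by omega), List.foldl_nil, List.filter_nil,
        show (0 : Int) - 1 = -1 by ring, pvS_neg_one, List.foldl_nil]
  | succ k ih =>
      rw [show ((k + 1 : Nat) : Int) = (k : Int) + 1 by push_cast; ring,
        PySem.List.pyRange_one_succ_right (by omega : (0 : Int) ≤ (k : Int)),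
        List.foldl_append, ih, List.foldl_cons, List.foldl_nil]
      unfold pvB_jstep
      have hrun : pvS cover ((k : Int) - 1) + PySem.List.pyGetD cover (k : Int) 0
          = pvS cover (k : Int) := (pvS_step cover (k : Int) (by omega)).symm
      simp only [hrun]
      rw [show (k : Int) + 1 - 1 = (k : Int) by ring]
      by_cases hk0 : (1 : Int) ≤ (k : Int)
      · rw [PySem.List.pyRange_one_succ_right hk0, List.filter_append]
        by_cases hz : pvS cover (k : Int) ≠ 0
        · rw [if_pos ⟨by omega, hz⟩]
          simp [hz]
        · rw [if_neg (by tauto)]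
          simp [hz]
      · have hkz : (k : Int) = 0 := by omega
        rw [if_neg (by omega)]
        rw [hkz, PySem.List.pyRange_one_eq_nil (by omega : (0 : Int) + 1 ≤ 1),
          PySem.List.pyRange_one_eq_nil (by omega : (0 : Int) ≤ 1), List.filter_nil]

lemma pv_case_eq (c : Int × List Int × List Int) : pvA_case c = pvB_case c := by
  obtain ⟨n, a, b⟩ := c
  unfold pvA_case pvB_case pvA_pair
  simp only []
  rw [pv_cover_eq a b _ [] (List.replicate (n + 1).toNat 0), List.foldl_nil]
  set kr := (PySem.List.pyRange 0 n 1).foldl (pvA_diff a b) (List.replicate (n + 1).toNat 0)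
    with hkr
  have hlen : kr.length = (n + 1).toNat := by rw [hkr, pv_diff_len]; simp
  suffices h : pvA_sieve n ((PySem.List.pyRange 1 (n + 1) 1).foldl pvA_pstep kr)
      = (PySem.List.pyRange 1 (n + 1) 1).filter
          (fun i => ! PySem.List.pyGetD
            (((PySem.List.pyRange 0 (n + 1) 1).foldl (pvB_jstep kr)
              ((0 : Int), List.replicate (n + 1).toNat false)).2) i false) by
    rw [h]
  by_cases hn : n < 0
  · have e1 : PySem.List.pyRange 1 (n + 1) 1 = [] := PySem.List.pyRange_one_eq_nil (by omega)
    unfold pvA_sieve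
    rw [e1]
    simp
  · have hn' : 0 ≤ n := by omega
    set k := n.toNat with hknat
    have hkn : (k : Int) = n := Int.toNat_of_nonneg hn'
    have hklen : k < kr.length := by omega
    have hinv : ((PySem.List.pyRange 0 (n + 1) 1).foldl (pvB_jstep kr)
        ((0 : Int), List.replicate (n + 1).toNat false)).2
        = ((PySem.List.pyRange 1 (n + 1) 1).filter fun j => decide (pvS kr j ≠ 0)).foldl
            (fun inv j => pvB_mark j inv) (List.replicate (n + 1).toNat false) := by
      have hjf := pv_jfold kr (List.replicate (n + 1).toNat false) (k + 1)
      rw [show ((k + 1 : Nat) : Int) = n + 1 by omega] at hjf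
      rw [hjf]
    rw [hinv]
    unfold pvA_sieve
    rw [PySem.List.foldl_append_if_eq_filter, List.nil_append]
    apply List.filter_congr
    intro i hi
    rw [PySem.List.mem_pyRange_one] at hi
    set kr2 := (PySem.List.pyRange 1 (n + 1) 1).foldl pvA_pstep kr with hkr2
    have hget : ∀ j : Int, 0 ≤ j → j ≤ (k : Int) → PySem.List.pyGetD kr2 j 0 = pvS kr j := by
      intro j h0 h1
      rw [hkr2, show n + 1 = 1 + (k : Int) by omega,
        pv_prefix_get kr k hklen j h0 (by omega), if_pos h1]
    have hbad : ∀ j ∈ (PySem.List.pyRange 1 (n + 1) 1).filter fun j => decide (pvS kr j ≠ 0),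
        1 ≤ j ∧ j < ((List.replicate (n + 1).toNat (false : Bool)).length : Int) := by
      intro j hj
      rw [List.mem_filter, PySem.List.mem_pyRange_one] at hj
      simp only [List.length_replicate]
      omega
    have hi0 : (0 : Int) ≤ i := by omega
    rw [pv_marks_get _ _ i hi0 hbad]
    have hit : ((i.toNat : Nat) : Int) = i := Int.toNat_of_nonneg hi0
    have h0 : PySem.List.pyGetD (List.replicate (n + 1).toNat (false : Bool)) i false
        = false := by
      rw [← hit, PySem.List.pyGetD_natCast]
      simp [List.getD_eq_getElem?_getD]
    rw [h0, Bool.false_or, pv_check_eq, Bool.eq_iff_iff]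
    simp only [List.all_eq_true, Bool.not_eq_true', List.any_eq_false, List.mem_filter,
      PySem.List.mem_pyRange_one, decide_eq_true_eq, beq_iff_eq]
    constructor
    · intro hL j hj
      obtain ⟨⟨hj1, hj2⟩, hjS⟩ := hj
      intro ⟨_, hij, hmod⟩
      have hdvd : i ∣ j := (PySem.Int.mod_eq_zero_iff_dvd j i).mp hmod
      have hjmem : j ∈ PySem.List.pyRange i (n + 1) i := by
        rw [PySem.List.mem_pyRange_iff_of_pos (by omega)]
        exact ⟨hij, by omega, (dvd_sub hdvd (dvd_refl i))⟩
      exact hjS (hget j (by omega) (by omega) ▸ hL j hjmem)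
    · intro hR j hj
      rw [PySem.List.mem_pyRange_iff_of_pos (by omega)] at hj
      obtain ⟨hj1, hj2, hj3⟩ := hj
      have hdvd : i ∣ j := by
        have : j = (j - i) + i := by ring
        rw [this]
        exact dvd_add hj3 (dvd_refl i)
      rw [hget j (by omega) (by omega)]
      by_contra hS
      exact hR j ⟨⟨by omega, by omega⟩, hS⟩
        ⟨hi.1, hj1, (PySem.Int.mod_eq_zero_iff_dvd j i).mpr hdvd⟩

-- ===== VERDICT (by name: the statement is the Claim_ definition above) =====
theorem find_monocarp_k_values_spec : Claim_equal_find_monocarp_k_values := by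
  intro t tcs _ _
  unfold Spec_find_monocarp_k_values find_monocarp_k_values find_monocarp_k_values_alt
  rw [show pvA_case = pvB_case from funext pv_case_eq]
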